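-- pv_equiv track=rewrite | github.com/dahaelee/Algorithm-Study | Epper/15-05.py | solution
-- ===== SOURCE A (Python) =====
-- def solution(string):
--     chars = []
--
--     if string[0] == 1:
--         chars.append('1')
--
--     cnt = 0
--     for i in range(len(string)-1):
--         if string[i] != string[i+1]:
--             chars.append(chr(ord('A') + cnt))
--             cnt = 0
--         else:
--             cnt += 1
--     chars.append(chr(ord('A') + cnt))
--
--     result = ''.join(chars)
--     return result
-- ===== SOURCE B (Python) =====
-- def solution(string):
--     prefix = '1' if string[0] == 1 else ''
--     cuts = [i for i, (x, y) in enumerate(zip(string, string[1:]), 1) if x != y]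
--     bounds = [0, *cuts, len(string)]
--     return prefix + ''.join(chr(ord('A') - 1 + b - a) for a, b in zip(bounds, bounds[1:]))
-- ===== Notes on version B (the rewrite author's own statement) =====
-- stated objective: alternative
-- what changed: B computes the run-boundary cut positions up front (enumerate+zip of adjacent pairs), brackets them with 0 and len, and maps adjacent differences to letters, instead of A's single pass maintaining a transition counter that emits characters inline.
import Mathlib
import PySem

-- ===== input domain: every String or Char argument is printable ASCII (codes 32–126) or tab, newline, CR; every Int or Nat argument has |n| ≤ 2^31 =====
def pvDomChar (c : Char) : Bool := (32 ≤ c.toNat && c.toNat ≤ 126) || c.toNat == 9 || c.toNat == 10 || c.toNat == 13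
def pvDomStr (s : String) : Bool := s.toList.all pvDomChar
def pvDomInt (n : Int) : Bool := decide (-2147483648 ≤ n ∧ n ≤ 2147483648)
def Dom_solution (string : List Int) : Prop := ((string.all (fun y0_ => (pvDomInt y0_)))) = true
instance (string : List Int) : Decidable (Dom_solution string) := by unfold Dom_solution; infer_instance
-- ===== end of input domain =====

-- B computes run-boundary cut positions up front and maps adjacent differences to letters,
-- instead of A's inline transition counter; same O(n) cost (objective: alternative).

-- ===== PORT A =====
-- literal port of A; the loop indices are always in range, so pyGetD is exact there
def solution (string : List Int) : String :=
  let chars : List Char := if PySem.List.pyGet? string 0 = some 1 then ['1'] else []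
  let st := (PySem.List.pyRange 0 ((string.length : Int) - 1) 1).foldl
      (fun (s : List Char × Nat) i =>
        if PySem.List.pyGetD string i 0 ≠ PySem.List.pyGetD string (i + 1) 0 then
          (s.1 ++ [Char.ofNat (65 + s.2)], 0)
        else (s.1, s.2 + 1)) (chars, 0)
  String.ofList (st.1 ++ [Char.ofNat (65 + st.2)])

-- ===== PORT B =====
-- literal port of Source B: cuts = [i for i,(x,y) in enumerate(zip(string, string[1:]), 1) if x != y],
-- bounds brackets the cuts with 0 and len(string), then letters from adjacent differences
def solution_alt (string : List Int) : String :=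
  let pre : String := if PySem.List.pyGet? string 0 = some 1 then "1" else ""
  let cuts : List Nat := ((string.zip (PySem.List.slice string (some 1) none)).zipIdx 1).filterMap
      (fun p => if p.1.1 ≠ p.1.2 then some p.2 else none)
  let bounds : List Nat := 0 :: (cuts ++ [string.length])
  pre ++ String.ofList ((bounds.zip (bounds.drop 1)).map (fun p => Char.ofNat (64 + (p.2 - p.1))))

-- ===== PRECONDITION & SPEC =====
-- Pre_ excludes only the empty list, on which A raises IndexError indexing its first element.
def Pre_solution (string : List Int) : Prop := string ≠ []
instance (string : List Int) : Decidable (Pre_solution string) := by unfold Pre_solution; infer_instance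
def pvWitness_solution : List Int := [1, 1, 2, 2, 2, 3]
def Spec_solution (string : List Int) (out : String) : Prop := out = solution_alt string
instance (string : List Int) (out : String) : Decidable (Spec_solution string out) := by unfold Spec_solution; infer_instance

-- ===== CLAIM (what is proved, stated in full; the proofs are below) =====
def Claim_equal_solution : Prop := ∀ (string : List Int), Dom_solution string → Pre_solution string → Spec_solution string (solution string)

-- ===== LEMMAS AND PROOFS =====

-- adjacent pairs of x :: ys, structurally
def pairs : Int → List Int → List (Int × Int)
  | _, [] => []
  | x, y :: ys => (x, y) :: pairs y ys

-- the common run/letter specification both ports are reduced to: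
-- x = previous element, cnt = current transition count, remaining list
def Rspec (x : Int) (cnt : Nat) : List Int → List Char
  | [] => [Char.ofNat (65 + cnt)]
  | y :: ys => if x ≠ y then Char.ofNat (65 + cnt) :: Rspec y 0 ys else Rspec y (cnt + 1) ys

-- cut positions starting at offset k
def cutsFrom (k : Nat) (x : Int) : List Int → List Nat
  | [] => []
  | y :: ys => if x ≠ y then k :: cutsFrom (k + 1) y ys else cutsFrom (k + 1) y ys

-- A's loop step, over an adjacent pair
def stepA (s : List Char × Nat) (p : Int × Int) : List Char × Nat :=
  if p.1 ≠ p.2 then (s.1 ++ [Char.ofNat (65 + s.2)], 0) else (s.1, s.2 + 1)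

theorem zip_tail_eq_pairs (x : Int) (ys : List Int) :
    (x :: ys).zip ys = pairs x ys := by
  induction ys generalizing x with
  | nil => rfl
  | cons y ys ih => rw [List.zip_cons_cons, ih]; rfl

-- A's fold over adjacent pairs computes Rspec
theorem foldA_pairs (ys : List Int) (x : Int) (chars : List Char) (cnt : Nat) :
    (((pairs x ys).foldl stepA (chars, cnt)).1 ++
      [Char.ofNat (65 + ((pairs x ys).foldl stepA (chars, cnt)).2)]) = chars ++ Rspec x cnt ys := by
  induction ys generalizing x chars cnt with
  | nil => simp [pairs, Rspec]
  | cons y ys ih =>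
    by_cases h : x = y
    · simp [pairs, Rspec, stepA, h, ih]
    · simp [pairs, Rspec, stepA, h, ih]
-- B's enumerate+filter computes cutsFrom
theorem filterMap_zipIdx_eq_cutsFrom (ys : List Int) (x : Int) (k : Nat) :
    ((pairs x ys).zipIdx k).filterMap
        (fun p => if p.1.1 ≠ p.1.2 then some p.2 else none) = cutsFrom k x ys := by
  induction ys generalizing x k with
  | nil => rfl
  | cons y ys ih =>
    have ihy := ih y (k + 1)
    by_cases h : x = y
    · simp [pairs, List.zipIdx_cons, cutsFrom, h]
      simpa using ihy
    · simp [pairs, List.zipIdx_cons, cutsFrom, h]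
      simpa using ihy

-- B's adjacent-difference map over the bracketed cut list computes Rspec
theorem diffmap_cutsFrom (ys : List Int) (x : Int) (a cnt : Nat) :
    (((a :: (cutsFrom (a + cnt + 1) x ys ++ [a + cnt + 1 + ys.length])).zip
        ((a :: (cutsFrom (a + cnt + 1) x ys ++ [a + cnt + 1 + ys.length])).drop 1)).map
      (fun p => Char.ofNat (64 + (p.2 - p.1)))) = Rspec x cnt ys := by
  induction ys generalizing x a cnt with
  | nil =>
    simp only [cutsFrom, List.nil_append, List.length_nil, Nat.add_zero, Rspec,
      List.drop_succ_cons, List.drop_zero, List.zip_cons_cons, List.zip_nil_right,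
      List.map_cons, List.map_nil]
    congr 2
    omega
  | cons y ys ih =>
    by_cases h : x = y
    · have ihy := ih y a (cnt + 1)
      rw [show cutsFrom (a + cnt + 1) x (y :: ys) = cutsFrom (a + cnt + 1 + 1) y ys from by
            simp [cutsFrom, h],
          show Rspec x cnt (y :: ys) = Rspec y (cnt + 1) ys from by simp [Rspec, h]]
      have e1 : a + (cnt + 1) + 1 = a + cnt + 1 + 1 := by omega
      have e2 : a + (cnt + 1) + 1 + ys.length = a + cnt + 1 + (y :: ys).length := by
        simp [List.length_cons]; omega
      rw [e2, e1] at ihy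
      exact ihy
    · have ihy := ih y (a + cnt + 1) 0
      rw [show cutsFrom (a + cnt + 1) x (y :: ys)
            = (a + cnt + 1) :: cutsFrom (a + cnt + 1 + 1) y ys from by simp [cutsFrom, h],
          show Rspec x cnt (y :: ys) = Char.ofNat (65 + cnt) :: Rspec y 0 ys from by
            simp [Rspec, h]]
      simp only [Nat.add_zero] at ihy
      have e2 : a + cnt + 1 + 1 + ys.length = a + cnt + 1 + (y :: ys).length := by
        simp [List.length_cons]; omega
      rw [e2] at ihy
      simp only [List.cons_append, List.zip_cons_cons, List.drop_succ_cons, List.drop_zero,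
        List.map_cons] at ihy ⊢
      rw [List.cons_eq_cons]
      constructor
      · congr 1; omega
      · exact ihy

theorem solution_spec : Claim_equal_solution := by
  intro string _ hpre
  unfold Spec_solution
  match string, hpre with
  | x :: ys, _ =>
    unfold solution solution_alt
    simp only [PySem.List.slice_from_one, List.tail_cons, zip_tail_eq_pairs,
      filterMap_zipIdx_eq_cutsFrom]
    have hrange : PySem.List.pyRange 0 (((x :: ys).length : Int) - 1) 1
        = (List.range ys.length).map (fun (k : Nat) => (k : Int)) := by
      apply List.ext_getElem
      · simp [PySem.List.length_pyRange_one]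
      · intro i h1 h2
        simp [PySem.List.getElem_pyRange_one]
    have e1 : ∀ (i : Nat) (hi : i < ys.length),
        PySem.List.pyGetD (x :: ys) ((i : Int)) 0 = (x :: ys)[i]'(by simp; omega) := by
      intro i hi
      rw [PySem.List.pyGetD_natCast]
      exact List.getD_eq_getElem _ _ (by simp; omega)
    have e2 : ∀ (i : Nat) (hi : i < ys.length),
        PySem.List.pyGetD (x :: ys) ((i : Int) + 1) 0 = ys[i]'hi := by
      intro i hi
      have hc : ((i : Int) + 1) = ((i + 1 : Nat) : Int) := by push_cast; ring
      rw [hc, PySem.List.pyGetD_natCast]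
      show ys.getD i 0 = _
      exact List.getD_eq_getElem _ _ hi
    have hpairsmap : (List.range ys.length).map
        (fun (k : Nat) => (PySem.List.pyGetD (x :: ys) ((k : Int)) 0,
                   PySem.List.pyGetD (x :: ys) ((k : Int) + 1) 0)) = pairs x ys := by
      rw [← zip_tail_eq_pairs]
      apply List.ext_getElem
      · simp [List.length_zip]
      · intro i h1 h2
        have hi : i < ys.length := by simp [List.length_zip] at h2; omega
        simp only [List.getElem_map, List.getElem_range, List.getElem_zip]
        rw [e1 i hi, e2 i hi]
    have hfoldA : ∀ (init : List Char × Nat),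
        (PySem.List.pyRange 0 (((x :: ys).length : Int) - 1) 1).foldl
          (fun (s : List Char × Nat) i =>
            if PySem.List.pyGetD (x :: ys) i 0 ≠ PySem.List.pyGetD (x :: ys) (i + 1) 0 then
              (s.1 ++ [Char.ofNat (65 + s.2)], 0)
            else (s.1, s.2 + 1)) init
        = (pairs x ys).foldl stepA init := by
      intro init
      rw [hrange, List.foldl_map, ← hpairsmap, List.foldl_map]
      rfl
    rw [hfoldA]
    have hA := foldA_pairs ys x (if PySem.List.pyGet? (x :: ys) 0 = some 1 then ['1'] else []) 0
    have hB := diffmap_cutsFrom ys x 0 0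
    simp only [Nat.zero_add] at hB
    have hlen : (x :: ys).length = 0 + 0 + 1 + ys.length := by simp [List.length_cons]; omega
    rw [hA, hlen, hB]
    by_cases hx : PySem.List.pyGet? (x :: ys) 0 = some 1
    · simp only [hx, reduceIte]
      rw [String.ofList_append]
    · simp only [hx, reduceIte]
      simp
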